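-- pv_equiv track=rewrite | github.com/piotr-kalanski/programming-exercises | exercises-python/regex/validating_credit_card_numbers/solution.py | not_have_4_or_more_consecutive_repeated_digits
-- ===== SOURCE A (Python) =====
-- def not_have_4_or_more_consecutive_repeated_digits(credit_card_number):
--     counter = 0
--     last_character = None
--     for c in credit_card_number:
--         if c == last_character:
--             counter += 1
--             if counter == 4:
--                 return False
--         elif c != '-':
--             counter = 1
--             last_character = c
--     return True
-- ===== SOURCE B (Python) =====
-- def not_have_4_or_more_consecutive_repeated_digits(credit_card_number):
--     s = credit_card_number.replace('-', '')
--     return not any(a == b == c == d for a, b, c, d in zip(s, s[1:], s[2:], s[3:]))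
-- ===== Notes on version B (the rewrite author's own statement) =====
-- stated objective: idiomatic
-- what changed: Replaces the stateful counter/last-character scan (with per-character dash skipping) by a normalization pass (delete dashes) followed by a declarative sliding-window check: no 4 consecutive equal characters via zip of the string with its three shifts.
import Mathlib
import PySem

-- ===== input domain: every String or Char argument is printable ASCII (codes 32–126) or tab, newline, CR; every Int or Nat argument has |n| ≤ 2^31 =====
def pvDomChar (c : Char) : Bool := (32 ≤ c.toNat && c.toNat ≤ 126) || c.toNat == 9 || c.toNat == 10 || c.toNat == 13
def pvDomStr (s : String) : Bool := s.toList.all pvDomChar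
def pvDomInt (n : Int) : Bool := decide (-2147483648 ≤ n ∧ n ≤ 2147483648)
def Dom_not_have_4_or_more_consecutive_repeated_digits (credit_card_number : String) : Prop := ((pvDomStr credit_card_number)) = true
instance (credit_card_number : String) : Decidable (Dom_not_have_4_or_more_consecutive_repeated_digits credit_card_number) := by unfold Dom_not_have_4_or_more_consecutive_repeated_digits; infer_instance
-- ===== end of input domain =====

-- B normalizes first (delete dashes) and then checks "no 4 equal consecutive characters"
-- declaratively via a sliding window (zip with three shifts), instead of A's counter/last-character
-- state machine; objective: idiomatic, same cost.


-- ===== PORT A =====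
-- the for-loop with early return, as structural recursion over (counter, last_character)
def pvLoopA : List Char → Int → Option Char → Bool
  | [], _, _ => true
  | c :: rest, counter, last =>
    if some c = last then
      if counter + 1 = 4 then false
      else pvLoopA rest (counter + 1) last
    else if c ≠ '-' then pvLoopA rest 1 (some c)
    else pvLoopA rest counter last

def not_have_4_or_more_consecutive_repeated_digits (credit_card_number : String) : Bool :=
  pvLoopA credit_card_number.toList 0 none

-- ===== PORT B =====
-- s = credit_card_number.replace('-', '');
-- not any(a == b == c == d for a,b,c,d in zip(s, s[1:], s[2:], s[3:]))
def not_have_4_or_more_consecutive_repeated_digits_alt (credit_card_number : String) : Bool :=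
  let s := (PySem.Str.replace credit_card_number "-" "").toList
  !((s.zip ((PySem.List.slice s (some 1) none).zip
      ((PySem.List.slice s (some 2) none).zip (PySem.List.slice s (some 3) none)))).any
    fun x => x.1 == x.2.1 && x.2.1 == x.2.2.1 && x.2.2.1 == x.2.2.2)

-- ===== PRECONDITION & SPEC =====
def Spec_not_have_4_or_more_consecutive_repeated_digits (credit_card_number : String) (out : Bool) : Prop := out = not_have_4_or_more_consecutive_repeated_digits_alt credit_card_number
instance (credit_card_number : String) (out : Bool) : Decidable (Spec_not_have_4_or_more_consecutive_repeated_digits credit_card_number out) := by unfold Spec_not_have_4_or_more_consecutive_repeated_digits; infer_instance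

-- ===== CLAIM (what is proved, stated in full; the proofs are below) =====
def Claim_equal_not_have_4_or_more_consecutive_repeated_digits : Prop := ∀ (credit_card_number : String), Dom_not_have_4_or_more_consecutive_repeated_digits credit_card_number → Spec_not_have_4_or_more_consecutive_repeated_digits credit_card_number (not_have_4_or_more_consecutive_repeated_digits credit_card_number)

-- ===== LEMMAS AND PROOFS =====

-- reference predicate: "no run of 4 equal consecutive characters", by direct recursion
def pvGood : List Char → Bool
  | a :: b :: c :: d :: t => if a = b ∧ b = c ∧ c = d then false else pvGood (b :: c :: d :: t)
  | _ => true

theorem pvLoopA_cons (c : Char) (t : List Char) (k : Int) (last : Option Char) :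
    pvLoopA (c :: t) k last =
      if some c = last then
        if k + 1 = 4 then false else pvLoopA t (k + 1) last
      else if c ≠ '-' then pvLoopA t 1 (some c)
      else pvLoopA t k last := rfl

-- replace('-','') is filtering out the dashes
theorem pvReplaceGo_filter : ∀ (fuel : Nat) (l acc : List Char), l.length ≤ fuel →
    PySem.Chars.replace.go ['-'] [] fuel l acc = acc.reverse ++ l.filter (fun c => c != '-')
  | 0, l, acc, h => by
      have : l = [] := List.eq_nil_of_length_eq_zero (Nat.le_zero.mp h)
      subst this; simp [PySem.Chars.replace.go]
  | _ + 1, [], acc, _ => by simp [PySem.Chars.replace.go]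
  | fuel + 1, c :: t, acc, h => by
      by_cases hc : c = '-'
      · subst hc
        have hp : List.isPrefixOf ['-'] ('-' :: t) = true := by simp [List.isPrefixOf]
        simp only [PySem.Chars.replace.go, hp, if_true, List.reverse_nil, List.nil_append]
        rw [show (List.drop (['-'] : List Char).length ('-' :: t)) = t by simp]
        rw [pvReplaceGo_filter fuel t acc (by simpa using Nat.lt_succ_iff.mp (by simpa using h))]
        simp
      · have hp : List.isPrefixOf ['-'] (c :: t) = false := by
          simp only [List.isPrefixOf, Bool.and_true]
          exact decide_eq_false fun h' => hc h'.symm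
        simp only [PySem.Chars.replace.go, hp, Bool.false_eq_true, if_false]
        rw [pvReplaceGo_filter fuel t (c :: acc) (by simpa using Nat.lt_succ_iff.mp (by simpa using h))]
        simp [hc]

theorem pvReplace_filter (l : List Char) :
    PySem.Chars.replace l ['-'] [] = l.filter (fun c => c != '-') := by
  rw [PySem.Chars.replace]
  simp only [List.isEmpty_cons]
  simpa using pvReplaceGo_filter l.length l [] le_rfl

-- dashes are transparent to A's loop (they neither reset counter nor last_character)
theorem pvLoopA_filter : ∀ (l : List Char) (k : Int) (last : Option Char), last ≠ some '-' →
    pvLoopA l k last = pvLoopA (l.filter (fun c => c != '-')) k last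
  | [], _, _, _ => rfl
  | c :: t, k, last, h => by
      by_cases hc : c = '-'
      · subst hc
        have h1 : ¬ (some '-' = last) := fun e => h e.symm
        rw [pvLoopA_cons, if_neg h1, if_neg (by simp),
          List.filter_cons_of_neg (by simp)]
        exact pvLoopA_filter t k last h
      · rw [List.filter_cons_of_pos (by simpa using hc)]
        by_cases hl : some c = last
        · rw [pvLoopA_cons, if_pos hl, pvLoopA_cons, if_pos hl]
          split
          · rfl
          · exact pvLoopA_filter t (k + 1) last h
        · rw [pvLoopA_cons, if_neg hl, if_pos hc, pvLoopA_cons, if_neg hl, if_pos hc]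
          exact pvLoopA_filter t 1 (some c) (by simp [hc])

-- peeling fewer than 3 leading copies of a, followed by a different character, off pvGood
theorem pvGood_peel1 (a c : Char) (h : c ≠ a) : ∀ (t : List Char),
    pvGood (a :: c :: t) = pvGood (c :: t)
  | [] => by simp [pvGood]
  | [_] => by simp [pvGood]
  | x :: y :: t' => by
      simp only [pvGood]
      rw [if_neg (by rintro ⟨h1, -⟩; exact h h1.symm)]

theorem pvGood_peel2 (a c : Char) (h : c ≠ a) : ∀ (t : List Char),
    pvGood (a :: a :: c :: t) = pvGood (c :: t)
  | [] => by simp [pvGood]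
  | x :: t' => by
      rw [show pvGood (a :: a :: c :: x :: t') = pvGood (a :: c :: x :: t') by
        simp only [pvGood]
        rw [if_neg (by rintro ⟨-, h2, -⟩; exact h h2.symm)]]
      exact pvGood_peel1 a c h (x :: t')

theorem pvGood_peel3 (a c : Char) (h : c ≠ a) (t : List Char) :
    pvGood (a :: a :: a :: c :: t) = pvGood (c :: t) := by
  rw [show pvGood (a :: a :: a :: c :: t) = pvGood (a :: a :: c :: t) by
    simp only [pvGood]
    rw [if_neg (by rintro ⟨-, -, h3⟩; exact h h3.symm)]]
  exact pvGood_peel2 a c h t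

-- A's loop state (counter = k copies of a just seen) against the reference predicate
theorem pvLoopA_good : ∀ (l : List Char) (a : Char) (k : Nat), 1 ≤ k → k ≤ 3 → '-' ∉ l →
    pvLoopA l (k : Int) (some a) = pvGood (List.replicate k a ++ l)
  | [], a, k, h1, h3, _ => by
      interval_cases k <;> simp [pvLoopA, pvGood, List.replicate]
  | c :: t, a, k, h1, h3, hd => by
      have hdc : c ≠ '-' := fun e => hd (e ▸ List.mem_cons_self ..)
      have hdt : '-' ∉ t := fun e => hd (List.mem_cons_of_mem _ e)
      by_cases hc : c = a
      · subst hc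
        by_cases hk : k = 3
        · subst hk
          rw [pvLoopA_cons, if_pos rfl, if_pos (by norm_num)]
          simp [List.replicate, pvGood]
        · rw [pvLoopA_cons, if_pos rfl, if_neg (by omega)]
          rw [show ((k : Int) + 1) = ((k + 1 : Nat) : Int) by push_cast; ring]
          rw [pvLoopA_good t c (k + 1) (by omega) (by omega) hdt]
          rw [show List.replicate k c ++ c :: t = List.replicate (k + 1) c ++ t by
            rw [List.replicate_succ']; simp]
      · rw [pvLoopA_cons, if_neg (by simpa using hc), if_pos hdc]
        rw [show (1 : Int) = ((1 : Nat) : Int) by norm_num,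
          pvLoopA_good t c 1 le_rfl (by omega) hdt]
        simp only [List.replicate_one, List.singleton_append]
        interval_cases k
        · exact (pvGood_peel1 a c hc t).symm
        · exact (pvGood_peel2 a c hc t).symm
        · exact (pvGood_peel3 a c hc t).symm

theorem pvLoopA_good_none (l : List Char) (hd : '-' ∉ l) : pvLoopA l 0 none = pvGood l := by
  cases l with
  | nil => rfl
  | cons c t =>
      have hdc : c ≠ '-' := fun e => hd (e ▸ List.mem_cons_self ..)
      have hdt : '-' ∉ t := fun e => hd (List.mem_cons_of_mem _ e)
      rw [pvLoopA_cons, if_neg (by simp), if_pos hdc]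
      rw [show (1 : Int) = ((1 : Nat) : Int) by norm_num,
        pvLoopA_good t c 1 le_rfl (by omega) hdt]
      simp

-- B's sliding window against the reference predicate
def pvWin (l : List Char) : Bool :=
  !((l.zip ((l.drop 1).zip ((l.drop 2).zip (l.drop 3)))).any
    fun x => x.1 == x.2.1 && x.2.1 == x.2.2.1 && x.2.2.1 == x.2.2.2)

theorem pvWin_eq_good : ∀ (l : List Char), pvWin l = pvGood l
  | [] => by simp [pvWin, pvGood]
  | [_] => by simp [pvWin, pvGood]
  | [_, _] => by simp [pvWin, pvGood]
  | [_, _, _] => by simp [pvWin, pvGood]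
  | a :: b :: c :: d :: t => by
      have step : pvWin (a :: b :: c :: d :: t) =
          (!(a == b && b == c && c == d) && pvWin (b :: c :: d :: t)) := by
        simp [pvWin, List.any_cons, Bool.not_or]
      rw [step, pvWin_eq_good (b :: c :: d :: t)]
      by_cases h : a = b ∧ b = c ∧ c = d
      · simp [pvGood, h]
      · have hb : (a == b && b == c && c == d) = false := by
          by_contra hfalse
          have := Bool.of_not_eq_false hfalse
          simp only [Bool.and_eq_true, beq_iff_eq] at this
          exact h ⟨this.1.1, this.1.2, this.2⟩
        simp only [pvGood]
        rw [if_neg h, hb]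
        simp

theorem pvSlice_drop (l : List Char) (k : Nat) :
    PySem.List.slice l (some (k : Int)) none = l.drop k := by
  simp [PySem.List.slice_from]

-- ===== VERDICT (by name: the statement is the Claim_ definition above) =====
theorem not_have_4_or_more_consecutive_repeated_digits_spec : Claim_equal_not_have_4_or_more_consecutive_repeated_digits := by
  intro s _
  unfold Spec_not_have_4_or_more_consecutive_repeated_digits
  unfold not_have_4_or_more_consecutive_repeated_digits
  unfold not_have_4_or_more_consecutive_repeated_digits_alt
  have hrep : (PySem.Str.replace s "-" "").toList = s.toList.filter (fun c => c != '-') := by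
    rw [PySem.Str.toList_replace]
    exact pvReplace_filter s.toList
  simp only [hrep]
  rw [show ((some 1 : Option Int)) = some ((1 : Nat) : Int) by norm_num,
    show ((some 2 : Option Int)) = some ((2 : Nat) : Int) by norm_num,
    show ((some 3 : Option Int)) = some ((3 : Nat) : Int) by norm_num]
  rw [pvSlice_drop, pvSlice_drop, pvSlice_drop]
  have hb : ∀ l : List Char,
      (!((l.zip ((l.drop 1).zip ((l.drop 2).zip (l.drop 3)))).any
        fun x => x.1 == x.2.1 && x.2.1 == x.2.2.1 && x.2.2.1 == x.2.2.2)) = pvWin l := fun _ => rfl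
  rw [hb, pvWin_eq_good]
  rw [pvLoopA_filter s.toList 0 none (by simp)]
  exact pvLoopA_good_none _ (by simp)
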